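-- pv_equiv track=rewrite | github.com/dunsmoorlab/VR-Cond | FPS.py | trackFPS
-- ===== SOURCE A (Python) =====
-- def trackFPS(channelL):
-- 	tracker = []
-- 	x=0
--
-- 	for i in channelL:
-- 		x+=1
-- 		if i == 5:
-- 			tracker.append(x)
--
-- 	## split the tracked indexed values into 1 second samples
-- 	## This creates a new list of the initial FPS channel trigger
-- 	## for each startle event
--
-- 	trackYa = tracker[0::1000]
--
-- 	return trackYa
-- ===== SOURCE B (Python) =====
-- def trackFPS(channelL):
-- 	out = []
-- 	pos = 0
-- 	m = 0
-- 	for v in channelL: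
-- 		pos += 1
-- 		if v == 5:
-- 			if m % 1000 == 0:
-- 				out.append(pos)
-- 			m += 1
-- 	return out
-- ===== Notes on version B (the rewrite author's own statement) =====
-- stated objective: simpler
-- what changed: B fuses A's collect-all-matching-positions-then-slice-every-1000th into a single pass with a position counter and a match counter, appending a position only when the match counter is divisible by 1000, so the full intermediate tracker list is never built.
import Mathlib
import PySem

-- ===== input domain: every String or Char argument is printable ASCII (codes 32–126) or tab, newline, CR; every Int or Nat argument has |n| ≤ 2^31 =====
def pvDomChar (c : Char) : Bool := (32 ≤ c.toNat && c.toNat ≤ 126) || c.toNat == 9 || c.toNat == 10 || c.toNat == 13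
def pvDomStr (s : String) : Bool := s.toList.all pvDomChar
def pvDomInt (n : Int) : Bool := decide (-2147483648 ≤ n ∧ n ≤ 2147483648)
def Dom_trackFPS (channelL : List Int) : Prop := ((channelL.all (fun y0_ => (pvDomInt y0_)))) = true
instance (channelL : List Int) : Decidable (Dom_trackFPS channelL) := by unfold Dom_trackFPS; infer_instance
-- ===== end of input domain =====

-- B fuses A's collect-all-positions-then-slice-[0::1000] into one pass with a position
-- counter and a match counter (simpler: the intermediate tracker list is never built).

-- ===== PORT A =====
def trackFPS (channelL : List Int) : List Int :=
  -- tracker/x loop, then tracker[0::1000] via PySem.List.slice? (step 1000 ≠ 0, so the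
  -- none branch of the match is unreachable; it is only a totality guard)
  let st := channelL.foldl (fun (s : List Int × Int) i =>
    let x := s.2 + 1
    (if i = 5 then s.1 ++ [x] else s.1, x)) ([], 0)
  match PySem.List.slice? st.1 (some 0) none 1000 with
  | some l => l
  | none => []

-- ===== PORT B =====
def trackFPS_altGo : List Int → Int → Int → List Int
  | [], _, _ => []
  | v :: t, pos, m =>
    if v = 5 then
      if m % 1000 = 0 then (pos + 1) :: trackFPS_altGo t (pos + 1) (m + 1)
      else trackFPS_altGo t (pos + 1) (m + 1)
    else trackFPS_altGo t (pos + 1) m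

def trackFPS_alt (channelL : List Int) : List Int :=
  trackFPS_altGo channelL 0 0

-- ===== PRECONDITION & SPEC =====
def Spec_trackFPS (channelL : List Int) (out : List Int) : Prop := out = trackFPS_alt channelL
instance (channelL : List Int) (out : List Int) : Decidable (Spec_trackFPS channelL out) := by unfold Spec_trackFPS; infer_instance

-- ===== CLAIM (what is proved, stated in full; the proofs are below) =====
def Claim_equal_trackFPS : Prop := ∀ (channelL : List Int), Dom_trackFPS channelL → Spec_trackFPS channelL (trackFPS channelL)

-- ===== LEMMAS AND PROOFS =====

-- the 1-based positions of the 5s, starting from position counter x (A's tracker)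
def pvTrackerT : List Int → Int → List Int
  | [], _ => []
  | i :: t, x => if i = 5 then (x + 1) :: pvTrackerT t (x + 1) else pvTrackerT t (x + 1)

lemma pvA_fold (l : List Int) : ∀ (acc : List Int) (x : Int),
    l.foldl (fun (s : List Int × Int) i =>
      let y := s.2 + 1
      (if i = 5 then s.1 ++ [y] else s.1, y)) (acc, x)
    = (acc ++ pvTrackerT l x, x + l.length) := by
  induction l with
  | nil => intro acc x; simp [pvTrackerT]
  | cons i t ih =>
    intro acc x
    by_cases h : i = 5 <;>
      simp [pvTrackerT, h, List.foldl_cons, ih] <;> omega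

-- keep every element whose running match counter m is ≡ 0 (mod 1000)
def pvPick : List Int → Int → List Int
  | [], _ => []
  | a :: t, m => if m % 1000 = 0 then a :: pvPick t (m + 1) else pvPick t (m + 1)

lemma pvPick_cons (a : Int) (t : List Int) (m : Int) :
    pvPick (a :: t) m = if m % 1000 = 0 then a :: pvPick t (m + 1) else pvPick t (m + 1) := rfl

lemma pvB_eq (l : List Int) : ∀ (x m : Int),
    trackFPS_altGo l x m = pvPick (pvTrackerT l x) m := by
  induction l with
  | nil => intro x m; rfl
  | cons i t ih =>
    intro x m
    by_cases h : i = 5 <;> simp [trackFPS_altGo, pvTrackerT, pvPick_cons, h, ih]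

lemma pvPick_congr (l : List Int) : ∀ (m m' : Int), m % 1000 = m' % 1000 →
    pvPick l m = pvPick l m' := by
  induction l with
  | nil => intro m m' _; rfl
  | cons a t ih =>
    intro m m' h
    have h2 : (m + 1) % 1000 = (m' + 1) % 1000 := by omega
    by_cases hm : m % 1000 = 0
    · have hm' : m' % 1000 = 0 := by omega
      rw [pvPick_cons, pvPick_cons, if_pos hm, if_pos hm', ih _ _ h2]
    · have hm' : ¬ m' % 1000 = 0 := by omega
      rw [pvPick_cons, pvPick_cons, if_neg hm, if_neg hm', ih _ _ h2]

-- every 1000th element: head, then recurse after dropping 999 of the tail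
def pvES : List Int → List Int
  | [] => []
  | a :: t => a :: pvES (t.drop 999)
termination_by l => l.length
decreasing_by simp

lemma pvES_nil : pvES [] = [] := by rw [pvES]

lemma pvES_cons (a : Int) (t : List Int) : pvES (a :: t) = a :: pvES (t.drop 999) := by
  rw [pvES]

lemma pvL1 : ∀ (l : List Int) (j : ℕ), 1 ≤ j → j ≤ 999 →
    pvPick l (j : Int) = pvPick (l.drop (1000 - j)) 0 := by
  intro l
  induction l with
  | nil => intro j _ _; simp [pvPick]
  | cons a t ih =>
    intro j h1 h2
    have hne : ¬ ((j : Int) % 1000 = 0) := by omega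
    have hd : (a :: t).drop (1000 - j) = t.drop (999 - j) := by
      have h : 1000 - j = (999 - j) + 1 := by omega
      rw [h, List.drop_succ_cons]
    rw [hd, pvPick_cons, if_neg hne]
    by_cases hj : j = 999
    · subst hj
      rw [pvPick_congr t ((999 : ℕ) + 1) 0 (by norm_num)]
      norm_num
    · have hcast : ((j : ℕ) : Int) + 1 = ((j + 1 : ℕ) : Int) := by push_cast; ring
      rw [hcast, ih (j + 1) (by omega) (by omega)]
      have h9 : 1000 - (j + 1) = 999 - j := by omega
      rw [h9]

lemma pvL2 : ∀ (l : List Int), pvPick l 0 = pvES l := by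
  intro l
  induction l using pvES.induct with
  | case1 => rw [pvES_nil]; rfl
  | case2 a t ih =>
    rw [pvES_cons, pvPick_cons, if_pos (by norm_num)]
    have h1 : pvPick t (((1 : ℕ) : Int)) = pvPick (t.drop (1000 - 1)) 0 :=
      pvL1 t 1 (by omega) (by omega)
    norm_num at h1 ⊢
    rw [h1, ih]

def pvCount (n : ℕ) : ℕ := (n + 999) / 1000

lemma pvL3 : ∀ (l : List Int),
    List.filterMap (fun k => l[1000 * k]?) (List.range (pvCount l.length)) = pvES l := by
  intro l
  induction l using pvES.induct with
  | case1 => simp [pvES_nil]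
  | case2 a t ih =>
    have hc : pvCount (a :: t).length = t.length / 1000 + 1 := by
      simp [pvCount]; omega
    have hc' : pvCount (t.drop 999).length = t.length / 1000 := by
      simp [pvCount]; omega
    rw [hc, List.range_succ_eq_map, List.filterMap_cons, List.filterMap_map]
    have hfun : ∀ k ∈ List.range (t.length / 1000),
        ((fun k => (a :: t)[1000 * k]?) ∘ Nat.succ) k
        = (fun k => (t.drop 999)[1000 * k]?) k := by
      intro k _
      simp only [Function.comp]
      rw [List.getElem?_drop]
      have h : 1000 * Nat.succ k = 1000 * k + 999 + 1 := by omega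
      rw [h, List.getElem?_cons_succ]
      congr 1
      omega
    rw [List.filterMap_congr hfun, ← hc', ih]
    simp [pvES_cons]

lemma pvL4 (l : List Int) :
    PySem.List.slice? l (some 0) none 1000 = some (pvES l) := by
  rw [PySem.List.slice?]
  simp only [PySem.List.sliceIndices]
  norm_num
  have hcnt : (if 0 < l.length then (((l.length : Int) + 1000 - 1) / 1000).toNat else 0)
      = pvCount l.length := by
    unfold pvCount
    split_ifs with h
    · omega
    · omega
  have hidx : ∀ x ∈ List.range (pvCount l.length),
      (fun x => l[((1000 : Int) * (x : ℕ)).toNat]?) x = (fun x => l[1000 * x]?) x := by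
    intro x _
    simp only
    congr 1
  rw [hcnt, List.filterMap_congr hidx, pvL3 l]

theorem pv_main (l : List Int) : trackFPS l = trackFPS_alt l := by
  unfold trackFPS trackFPS_alt
  rw [pvA_fold l [] 0]
  simp only [List.nil_append]
  rw [pvL4 (pvTrackerT l 0), pvB_eq, pvL2]

-- ===== VERDICT (by name: the statement is the Claim_ definition above) =====
theorem trackFPS_spec : Claim_equal_trackFPS := by
  intro l _
  unfold Spec_trackFPS
  exact (pv_main l).symm ▸ rfl
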